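-- pv_equiv track=rewrite | github.com/trufflesecurity/of-CORS | cors_service/web/util/domain.py | domain_to_all_subdomains
-- ===== SOURCE A (Python) =====
-- def domain_to_all_subdomains(to_parse: str) -> list[str]:
--     """Process the given domain into all domains and subdomains that it contains."""
--     if to_parse == "":
--         return []
--     if to_parse.count(".") < 2:
--         return [to_parse]
--     to_return = []
--     parts = to_parse.split(".")
--     parts_reversed = list(reversed(parts))
--     for i in range(len(parts_reversed) - 1):
--         to_return.append(".".join(reversed(parts_reversed[: i + 2])))
--     return to_return
-- ===== SOURCE B (Python) =====
-- def domain_to_all_subdomains(to_parse: str) -> list[str]: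
--     """Process the given domain into all domains and subdomains that it contains."""
--     if to_parse == "":
--         return []
--     if to_parse.count(".") < 2:
--         return [to_parse]
--     parts = to_parse.split(".")
--     cur = parts[-1]
--     to_return = []
--     for p in reversed(parts[:-1]):
--         cur = p + "." + cur
--         to_return.append(cur)
--     return to_return
-- ===== Notes on version B (the rewrite author's own statement) =====
-- stated objective: alternative
-- what changed: Instead of re-slicing the reversed parts list and re-joining it from scratch at every step, B keeps one running suffix accumulator (cur = parts[i] + '.' + cur) and appends it each iteration, removing the per-step reversed-slice-and-join.
import Mathlib
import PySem

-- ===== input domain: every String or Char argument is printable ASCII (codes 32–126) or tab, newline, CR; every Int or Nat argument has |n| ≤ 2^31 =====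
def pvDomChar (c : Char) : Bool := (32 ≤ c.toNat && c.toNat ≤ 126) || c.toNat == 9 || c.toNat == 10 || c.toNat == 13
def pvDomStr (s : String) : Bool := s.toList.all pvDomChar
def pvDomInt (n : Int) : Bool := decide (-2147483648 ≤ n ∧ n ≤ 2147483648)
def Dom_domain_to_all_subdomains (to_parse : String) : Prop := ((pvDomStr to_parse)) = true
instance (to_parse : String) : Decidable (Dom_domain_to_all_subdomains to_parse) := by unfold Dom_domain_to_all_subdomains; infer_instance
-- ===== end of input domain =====

-- B replaces A's per-step re-slice-and-join of the reversed parts list by a single running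
-- accumulator extended once per step (objective: simpler/alternative decomposition, O(total output) joins).

-- ===== PORT A =====
def domain_to_all_subdomains (to_parse : String) : List String :=
  if to_parse == "" then []
  else if PySem.Str.count to_parse "." < 2 then [to_parse]
  else
    -- '.'.split with nonempty separator never raises: split? is some here
    let parts := (PySem.Str.split? to_parse ".").getD []
    let parts_reversed := parts.reverse
    (PySem.List.pyRange 0 (PySem.List.len parts_reversed - 1) 1).foldl
      (fun to_return i =>
        to_return ++ [PySem.Str.join "." (PySem.List.slice parts_reversed none (some (i + 2))).reverse])
      []

-- ===== PORT B =====
def domain_to_all_subdomains_alt (to_parse : String) : List String :=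
  if to_parse == "" then []
  else if PySem.Str.count to_parse "." < 2 then [to_parse]
  else
    let parts := (PySem.Str.split? to_parse ".").getD []
    -- parts[-1]; parts from split is never empty, default never used
    let cur0 := PySem.List.pyGetD parts (-1) ""
    -- 'p + "." + cur' is exact string concatenation, done on the code-point lists
    ((parts.dropLast.reverse).foldl
      (fun (st : String × List String) p =>
        let cur := String.ofList (p.toList ++ '.' :: st.1.toList)
        (cur, st.2 ++ [cur]))
      (cur0, [])).2

-- ===== PRECONDITION & SPEC =====
def Spec_domain_to_all_subdomains (to_parse : String) (out : List String) : Prop := out = domain_to_all_subdomains_alt to_parse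
instance (to_parse : String) (out : List String) : Decidable (Spec_domain_to_all_subdomains to_parse out) := by unfold Spec_domain_to_all_subdomains; infer_instance

-- ===== CLAIM (what is proved, stated in full; the proofs are below) =====
def Claim_equal_domain_to_all_subdomains : Prop := ∀ (to_parse : String), Dom_domain_to_all_subdomains to_parse → Spec_domain_to_all_subdomains to_parse (domain_to_all_subdomains to_parse)

-- ===== LEMMAS AND PROOFS =====

-- cur after B's loop over a prefix, as a standalone fold
def pvCur (l : List String) (c : String) : String :=
  l.foldl (fun c p => String.ofList (p.toList ++ '.' :: c.toList)) c

-- B's fold, characterised: the second component lists pvCur of every nonempty prefix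
theorem pvFoldB (l : List String) (cur : String) (out : List String) :
    (l.foldl (fun (st : String × List String) p =>
        (String.ofList (p.toList ++ '.' :: st.1.toList),
         st.2 ++ [String.ofList (p.toList ++ '.' :: st.1.toList)])) (cur, out))
    = (pvCur l cur, out ++ (List.range l.length).map (fun k => pvCur (l.take (k + 1)) cur)) := by
  induction l generalizing cur out with
  | nil => simp [pvCur]
  | cons p t ih =>
      simp only [List.foldl_cons, ih, pvCur, List.length_cons, List.range_succ_eq_map,
        List.map_cons, List.map_map, List.take_succ_cons, List.foldl_cons]
      simp

-- pvCur over a reversed list is a join of the list (in order) with the seed appended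
theorem pvCur_reverse_join (q : List String) (c : String) :
    pvCur q.reverse c = PySem.Str.join "." (q ++ [c]) := by
  induction q with
  | nil =>
      apply String.toList_inj.mp
      simp [pvCur, PySem.Str.toList_join, PySem.Chars.join_singleton]
  | cons p t ih =>
      apply String.toList_inj.mp
      have : (p :: t).reverse = t.reverse ++ [p] := by simp
      rw [this, pvCur, List.foldl_append]
      have hc : t.reverse.foldl (fun c p => String.ofList (p.toList ++ '.' :: c.toList)) c
          = pvCur t.reverse c := rfl
      rw [hc, ih]
      rcases t with _ | ⟨r, rs⟩
      · simp [PySem.Str.toList_join, PySem.Chars.join_cons_cons, PySem.Chars.join_singleton]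
      · simp [PySem.Str.toList_join, PySem.Chars.join_cons_cons]

-- A's per-step value: the slice-reverse-join is a join of a suffix of parts
theorem pvAform (parts : List String) (k : Nat) :
    PySem.Str.join "." ((PySem.List.slice parts.reverse none (some ((k : Int) + 2))).reverse)
    = PySem.Str.join "." (parts.drop (parts.length - (k + 2))) := by
  rw [PySem.List.slice_to parts.reverse (b := (k : Int) + 2) (by positivity)]
  have h2 : ((k : Int) + 2).toNat = k + 2 := by omega
  rw [h2, List.take_reverse, List.reverse_reverse]

-- B's per-step value: the accumulator equals the same join of the same suffix
theorem pvBform (parts : List String) (h : parts ≠ []) (k : Nat) :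
    pvCur ((parts.dropLast.reverse).take (k + 1)) (parts.getLast h)
    = PySem.Str.join "." (parts.drop (parts.length - (k + 2))) := by
  have hn : 1 ≤ parts.length := List.length_pos_iff.mpr h
  rw [List.take_reverse, pvCur_reverse_join]
  have h2 : parts.dropLast.length - (k + 1) = parts.length - (k + 2) := by
    rw [List.length_dropLast]; omega
  have key : ∀ j, j ≤ parts.length - 1 → parts.drop j = parts.dropLast.drop j ++ [parts.getLast h] := by
    intro j hj
    conv_lhs => rw [← List.dropLast_concat_getLast h]
    rw [List.drop_append_of_le_length (by rw [List.length_dropLast]; omega)]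
  rw [h2, key _ (by omega)]

theorem domain_to_all_subdomains_spec : Claim_equal_domain_to_all_subdomains := by
  intro s _
  unfold Spec_domain_to_all_subdomains domain_to_all_subdomains domain_to_all_subdomains_alt
  split_ifs with h1 h2
  · rfl
  · rfl
  · dsimp only
    generalize (PySem.Str.split? s ".").getD [] = parts
    rcases parts with _ | ⟨p, ps⟩
    · rfl
    · have hne : p :: ps ≠ [] := List.cons_ne_nil p ps
      have hn : 1 ≤ (p :: ps).length := List.length_pos_iff.mpr hne
      have hcast : (PySem.List.len (p :: ps).reverse - 1) = (((p :: ps).length - 1 : Nat) : Int) := by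
        rw [PySem.List.len_eq, List.length_reverse]; omega
      rw [hcast, PySem.List.pyRange_zero_natCast,
        PySem.List.foldl_append_singleton_eq_map, List.map_map,
        PySem.List.pyGetD_neg_one (p :: ps) "" hne, pvFoldB, List.nil_append,
        List.length_reverse, List.length_dropLast]
      apply List.map_congr_left
      intro k _
      simp only [Function.comp_apply]
      rw [pvAform, pvBform (p :: ps) hne k]
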